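-- pv_equiv track=rewrite | github.com/Leandrns/aulas-python | aula09_MATRIZ.py | gera_matriz
-- ===== SOURCE A (Python) =====
-- def gera_matriz(linhas, colunas):
--      matriz = []
--      for i in range(linhas):
--          sub_lista = []
--          for j in range(colunas):
--              sub_lista.append(i+j)
--          matriz.append(sub_lista)
--      return matriz
-- ===== SOURCE B (Python) =====
-- def gera_matriz(linhas, colunas):
--     # Keep the previous row as state: first row is range(colunas),
--     # each next row is the previous row with every entry incremented.
--     matriz = []
--     if linhas <= 0:
--         return matriz
--     row = list(range(colunas))
--     for _ in range(linhas):
--         matriz.append(row)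
--         row = [x + 1 for x in row]
--     return matriz
-- ===== Notes on version B (the rewrite author's own statement) =====
-- stated objective: alternative
-- what changed: Instead of recomputing each cell as i+j in a nested loop, B maintains the previous row as state: the first row is range(colunas) and each subsequent row is the previous row with every element incremented by 1.
import Mathlib
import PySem

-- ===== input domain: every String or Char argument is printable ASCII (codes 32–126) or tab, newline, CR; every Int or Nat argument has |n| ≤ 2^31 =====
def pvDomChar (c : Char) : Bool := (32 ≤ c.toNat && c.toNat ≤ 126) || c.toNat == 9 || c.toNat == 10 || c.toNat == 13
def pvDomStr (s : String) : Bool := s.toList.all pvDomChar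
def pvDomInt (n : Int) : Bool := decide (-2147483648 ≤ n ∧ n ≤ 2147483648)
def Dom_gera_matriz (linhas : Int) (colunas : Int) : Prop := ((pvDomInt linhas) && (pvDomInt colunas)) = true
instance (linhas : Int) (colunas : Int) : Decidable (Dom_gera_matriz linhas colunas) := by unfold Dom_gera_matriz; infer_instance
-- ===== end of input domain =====

-- B replaces the nested i+j loops by row-to-row state (next row = previous row + 1); same cost, different traversal (objective: alternative).

-- ===== PORT A =====
def gera_matriz (linhas : Int) (colunas : Int) : List (List Int) :=
  (PySem.List.pyRange 0 linhas 1).foldl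
    (fun matriz i =>
      matriz ++ [(PySem.List.pyRange 0 colunas 1).foldl (fun sub_lista j => sub_lista ++ [i + j]) []])
    []

-- ===== PORT B =====
def gera_matriz_alt (linhas : Int) (colunas : Int) : List (List Int) :=
  if linhas ≤ 0 then [] else
  ((PySem.List.pyRange 0 linhas 1).foldl
    (fun (st : List (List Int) × List Int) _ => (st.1 ++ [st.2], st.2.map (fun x => x + 1)))
    ([], PySem.List.pyRange 0 colunas 1)).1

-- ===== PRECONDITION & SPEC =====
def Spec_gera_matriz (linhas : Int) (colunas : Int) (out : List (List Int)) : Prop := out = gera_matriz_alt linhas colunas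
instance (linhas : Int) (colunas : Int) (out : List (List Int)) : Decidable (Spec_gera_matriz linhas colunas out) := by unfold Spec_gera_matriz; infer_instance

-- ===== CLAIM (what is proved, stated in full; the proofs are below) =====
def Claim_equal_gera_matriz : Prop := ∀ (linhas : Int) (colunas : Int), Dom_gera_matriz linhas colunas → Spec_gera_matriz linhas colunas (gera_matriz linhas colunas)

-- ===== LEMMAS AND PROOFS =====

theorem pv_foldl_app_map {β : Type} (f : Int → β) (l : List Int) (acc : List β) :
    l.foldl (fun s j => s ++ [f j]) acc = acc ++ l.map f := by
  induction l generalizing acc with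
  | nil => simp
  | cons x xs ih => simp [List.foldl_cons, ih]

theorem pv_b_fold (c : Int) (k : Nat) :
    (PySem.List.pyRange 0 (k : Int) 1).foldl
      (fun (st : List (List Int) × List Int) _ => (st.1 ++ [st.2], st.2.map (fun x => x + 1)))
      ([], PySem.List.pyRange 0 c 1)
    = ((PySem.List.pyRange 0 (k : Int) 1).map
         (fun i => (PySem.List.pyRange 0 c 1).map (fun j => j + i)),
       (PySem.List.pyRange 0 c 1).map (fun j => j + (k : Int))) := by
  induction k with
  | zero => simp [PySem.List.pyRange_one_eq_nil]
  | succ n ih =>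
    have h : ((n : Int) + 1) = ((n + 1 : Nat) : Int) := by push_cast; ring
    have hsplit := PySem.List.pyRange_one_succ_right (a := 0) (b := (n : Int)) (by positivity)
    rw [← h, hsplit, List.foldl_append, ih, List.map_append]
    simp only [List.foldl_cons, List.foldl_nil, List.map_map]
    refine Prod.ext ?_ ?_
    · simp
    · apply List.map_congr_left; intro j _; simp; ring

-- ===== VERDICT (by name: the statement is the Claim_ definition above) =====
theorem gera_matriz_spec : Claim_equal_gera_matriz := by
  intro linhas colunas _
  unfold Spec_gera_matriz gera_matriz gera_matriz_alt
  by_cases h : linhas ≤ 0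
  · rw [PySem.List.pyRange_one_eq_nil h, if_pos h]; rfl
  · rw [if_neg h]
    obtain ⟨k, hk⟩ : ∃ k : Nat, linhas = (k : Int) := ⟨linhas.toNat, by omega⟩
    subst hk
    rw [pv_b_fold]
    rw [pv_foldl_app_map (f := fun i =>
      (PySem.List.pyRange 0 colunas 1).foldl (fun sub_lista j => sub_lista ++ [i + j]) []) _ []]
    simp only [List.nil_append]
    apply List.map_congr_left; intro i _
    rw [pv_foldl_app_map (f := fun j => i + j)]
    simp only [List.nil_append]
    apply List.map_congr_left; intro j _; ring
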